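-- pv_equiv track=rewrite | github.com/chenty2333/kairOS | scripts/impl/compare-abi-snapshots.py | diff_cases
-- ===== SOURCE A (Python) =====
-- from typing import Dict, List, Tuple
--
-- def diff_cases(base: Dict[str, dict], cur: Dict[str, dict]) -> Tuple[List[str], List[str], List[Tuple[str, int, int, str, str]]]:
--     base_keys = set(base)
--     cur_keys = set(cur)
--     missing = sorted(base_keys - cur_keys)
--     extra = sorted(cur_keys - base_keys)
--     mismatched: List[Tuple[str, int, int, str, str]] = []
--     for key in sorted(base_keys & cur_keys):
--         base_errno = int(base[key].get("errno", 0))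
--         cur_errno = int(cur[key].get("errno", 0))
--         if base_errno != cur_errno:
--             mismatched.append(
--                 (
--                     key,
--                     base_errno,
--                     cur_errno,
--                     str(base[key].get("errno_name", "OTHER")),
--                     str(cur[key].get("errno_name", "OTHER")),
--                 )
--             )
--     return missing, extra, mismatched
-- ===== SOURCE B (Python) =====
-- def diff_cases(base, cur):
--     # merge-join: walk the two sorted key lists with two pointers
--     bk = sorted(set(base))
--     ck = sorted(set(cur))
--     missing, extra, mismatched = [], [], []
--     i = j = 0
--     while i < len(bk) and j < len(ck):
--         if bk[i] < ck[j]: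
--             missing.append(bk[i])
--             i += 1
--         elif ck[j] < bk[i]:
--             extra.append(ck[j])
--             j += 1
--         else:
--             key = bk[i]
--             base_errno = int(base[key].get("errno", 0))
--             cur_errno = int(cur[key].get("errno", 0))
--             if base_errno != cur_errno:
--                 mismatched.append(
--                     (key, base_errno, cur_errno,
--                      str(base[key].get("errno_name", "OTHER")),
--                      str(cur[key].get("errno_name", "OTHER")))
--                 )
--             i += 1
--             j += 1
--     missing.extend(bk[i:])
--     extra.extend(ck[j:])
--     return missing, extra, mismatched
-- ===== Notes on version B (the rewrite author's own statement) =====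
-- stated objective: alternative
-- what changed: B replaces A's three set operations (difference, difference, intersection) each followed by its own sort with a merge join: it sorts the two key lists once and walks them with two pointers, classifying each key into missing/extra/mismatched by comparison, so no set algebra or membership tests remain.
import Mathlib
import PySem

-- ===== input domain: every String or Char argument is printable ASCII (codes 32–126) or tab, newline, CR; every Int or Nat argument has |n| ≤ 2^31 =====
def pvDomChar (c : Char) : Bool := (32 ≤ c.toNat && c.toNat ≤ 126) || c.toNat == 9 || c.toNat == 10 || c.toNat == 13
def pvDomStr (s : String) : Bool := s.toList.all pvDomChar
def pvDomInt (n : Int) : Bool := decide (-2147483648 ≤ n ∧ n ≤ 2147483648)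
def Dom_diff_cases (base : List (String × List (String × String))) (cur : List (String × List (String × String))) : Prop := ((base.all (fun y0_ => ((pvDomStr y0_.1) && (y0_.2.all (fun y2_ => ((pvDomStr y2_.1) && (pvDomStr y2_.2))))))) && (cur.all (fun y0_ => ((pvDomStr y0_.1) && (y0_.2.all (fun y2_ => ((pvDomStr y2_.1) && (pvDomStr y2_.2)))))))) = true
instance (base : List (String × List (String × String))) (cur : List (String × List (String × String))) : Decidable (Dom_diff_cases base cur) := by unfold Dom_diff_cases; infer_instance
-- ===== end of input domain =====

-- B replaces A's three set operations, each with its own sort, by a merge join: the two sorted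
-- key lists are walked with two pointers and each key classified by comparison; equivalence of
-- the RETURN value is proved on Pre_ (errno fields of shared keys parse as int — elsewhere the
-- Python A raises ValueError).

-- shared per-key helpers: int(d.get("errno", 0)) and str(d.get("errno_name", "OTHER"))
-- (the int() fallback 0 on an unparsable string is unreachable under Pre_)
def pvErrno (d : List (String × String)) : Int :=
  match PySem.Dict.get? (PySem.Dict.mk d) "errno" with
  | none => 0
  | some s => (PySem.Int.ofStr? s).getD 0

def pvErrnoName (d : List (String × String)) : String :=
  PySem.Dict.getD (PySem.Dict.mk d) "errno_name" "OTHER"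

-- ===== PORT A =====
def diff_cases (base : List (String × List (String × String))) (cur : List (String × List (String × String))) : List String × List String × (List (String × Int × Int × String × String)) :=
  let base_keys := PySem.Set.ofList ((PySem.Dict.mk base).keys)
  let cur_keys := PySem.Set.ofList ((PySem.Dict.mk cur).keys)
  let missing := PySem.List.sorted (PySem.Set.diff base_keys cur_keys) (fun x => x) false
  let extra := PySem.List.sorted (PySem.Set.diff cur_keys base_keys) (fun x => x) false
  let mismatched := (PySem.List.sorted (PySem.Set.inter base_keys cur_keys) (fun x => x) false).foldl
    (fun acc key =>
      let bd := ((PySem.Dict.mk base).get? key).getD []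
      let cd := ((PySem.Dict.mk cur).get? key).getD []
      let base_errno := pvErrno bd
      let cur_errno := pvErrno cd
      if base_errno ≠ cur_errno then
        acc ++ [(key, base_errno, cur_errno, pvErrnoName bd, pvErrnoName cd)]
      else acc) []
  (missing, extra, mismatched)

-- ===== PORT B =====
-- the while loop of Source B: the unread suffixes bk[i:], ck[j:] are the two list arguments,
-- missing/extra/mismatched are the accumulators
def pvMergeLoop (base cur : List (String × List (String × String))) :
    List String → List String → List String → List String →
    List (String × Int × Int × String × String) →
    List String × List String × (List (String × Int × Int × String × String))
  | [], ck, m, e, mm => (m, e ++ ck, mm)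
  | bk, [], m, e, mm => (m ++ bk, e, mm)
  | b :: bt, c :: ct, m, e, mm =>
    if b < c then pvMergeLoop base cur bt (c :: ct) (m ++ [b]) e mm
    else if c < b then pvMergeLoop base cur (b :: bt) ct m (e ++ [c]) mm
    else
      let bd := ((PySem.Dict.mk base).get? b).getD []
      let cd := ((PySem.Dict.mk cur).get? b).getD []
      let base_errno := pvErrno bd
      let cur_errno := pvErrno cd
      if base_errno ≠ cur_errno then
        pvMergeLoop base cur bt ct m e (mm ++ [(b, base_errno, cur_errno, pvErrnoName bd, pvErrnoName cd)])
      else pvMergeLoop base cur bt ct m e mm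
  termination_by bk ck _ _ _ => bk.length + ck.length

def diff_cases_alt (base : List (String × List (String × String))) (cur : List (String × List (String × String))) : List String × List String × (List (String × Int × Int × String × String)) :=
  let bk := PySem.List.sorted (PySem.Set.ofList ((PySem.Dict.mk base).keys)) (fun x => x) false
  let ck := PySem.List.sorted (PySem.Set.ofList ((PySem.Dict.mk cur).keys)) (fun x => x) false
  pvMergeLoop base cur bk ck [] [] []

-- ===== PRECONDITION & SPEC =====
-- Pre_ excludes exactly the inputs where A (and B alike) raises ValueError: a key present in
-- BOTH dicts whose inner dict carries an "errno" value that int() cannot parse.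
def pvErrnoParses (d : List (String × String)) : Prop :=
  ∀ s, PySem.Dict.get? (PySem.Dict.mk d) "errno" = some s → (PySem.Int.ofStr? s).isSome = true
def Pre_diff_cases (base : List (String × List (String × String))) (cur : List (String × List (String × String))) : Prop :=
  ∀ k ∈ (PySem.Dict.mk base).keys, k ∈ (PySem.Dict.mk cur).keys →
    pvErrnoParses (((PySem.Dict.mk base).get? k).getD []) ∧
    pvErrnoParses (((PySem.Dict.mk cur).get? k).getD [])
instance (base : List (String × List (String × String))) (cur : List (String × List (String × String))) : Decidable (Pre_diff_cases base cur) := by unfold Pre_diff_cases pvErrnoParses; infer_instance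
def pvWitness_diff_cases : (List (String × List (String × String))) × (List (String × List (String × String))) :=
  ([("open", [("errno", "1"), ("errno_name", "EPERM")]), ("read", [])],
   [("open", [("errno", "2"), ("errno_name", "ENOENT")]), ("close", [("errno", "0")])])
def Spec_diff_cases (base : List (String × List (String × String))) (cur : List (String × List (String × String))) (out : List String × List String × (List (String × Int × Int × String × String))) : Prop := out = diff_cases_alt base cur
instance (base : List (String × List (String × String))) (cur : List (String × List (String × String))) (out : List String × List String × (List (String × Int × Int × String × String))) : Decidable (Spec_diff_cases base cur out) := by
  unfold Spec_diff_cases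
  exact @instDecidableEqProd _ _ inferInstance (@instDecidableEqProd _ _ inferInstance inferInstance) _ _

-- ===== CLAIM (what is proved, stated in full; the proofs are below) =====
def Claim_equal_diff_cases : Prop := ∀ (base : List (String × List (String × String))) (cur : List (String × List (String × String))), Dom_diff_cases base cur → Pre_diff_cases base cur → Spec_diff_cases base cur (diff_cases base cur)

-- ===== LEMMAS AND PROOFS =====

-- shorthand predicates/builders used only by the proofs
def pvDiffB (base cur : List (String × List (String × String))) (k : String) : Bool :=
  decide (pvErrno (((PySem.Dict.mk base).get? k).getD []) ≠ pvErrno (((PySem.Dict.mk cur).get? k).getD []))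
def pvTup (base cur : List (String × List (String × String))) (k : String) :
    String × Int × Int × String × String :=
  (k, pvErrno (((PySem.Dict.mk base).get? k).getD []), pvErrno (((PySem.Dict.mk cur).get? k).getD []),
   pvErrnoName (((PySem.Dict.mk base).get? k).getD []), pvErrnoName (((PySem.Dict.mk cur).get? k).getD []))

-- A's mismatched loop is a filter-and-map over the traversed list
lemma pvAfold (base cur : List (String × List (String × String))) (l : List String)
    (acc : List (String × Int × Int × String × String)) :
    l.foldl (fun acc key =>
      if pvErrno (((PySem.Dict.mk base).get? key).getD []) ≠ pvErrno (((PySem.Dict.mk cur).get? key).getD []) then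
        acc ++ [(key, pvErrno (((PySem.Dict.mk base).get? key).getD []), pvErrno (((PySem.Dict.mk cur).get? key).getD []),
                 pvErrnoName (((PySem.Dict.mk base).get? key).getD []), pvErrnoName (((PySem.Dict.mk cur).get? key).getD []))]
      else acc) acc
    = acc ++ (l.filter (pvDiffB base cur)).map (pvTup base cur) := by
  induction l generalizing acc with
  | nil => simp
  | cons k t ih =>
    rw [List.foldl_cons]
    by_cases hd : pvErrno (((PySem.Dict.mk base).get? k).getD []) = pvErrno (((PySem.Dict.mk cur).get? k).getD [])
    · rw [if_neg (not_not_intro hd), ih]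
      simp [pvDiffB, hd]
    · rw [if_pos hd, ih]
      simp [pvDiffB, hd, pvTup]

-- the sorted list of a dict's key set
def pvK (d : List (String × List (String × String))) : List String :=
  PySem.List.sorted (PySem.Set.ofList ((PySem.Dict.mk d).keys)) (fun x => x) false

lemma pvK_nodup (d : List (String × List (String × String))) : (pvK d).Nodup :=
  List.Perm.nodup (PySem.List.sorted_perm _ _ _).symm (PySem.Set.nodup_ofList _)

lemma pvK_pairwise (d : List (String × List (String × String))) :
    (pvK d).Pairwise (· < ·) := by
  have hle := PySem.List.sorted_pairwise (PySem.Set.ofList ((PySem.Dict.mk d).keys)) (fun x => x)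
  have hnd := pvK_nodup d
  exact (hle.and hnd).imp (fun h => lt_of_le_of_ne h.1 h.2)

lemma pvK_mem (d : List (String × List (String × String))) (x : String) :
    x ∈ pvK d ↔ x ∈ (PySem.Dict.mk d).keys := by
  unfold pvK
  rw [PySem.List.mem_sorted, PySem.Set.mem_ofList]

-- a sorted set expression equals the matching filter of a sorted nodup list
lemma pv_sorted_eq_filter (s : PySem.Set String) (L : List String) (p : String → Bool)
    (hnd : s.Nodup) (hLnd : L.Nodup) (hLpw : L.Pairwise (· < ·))
    (hmem : ∀ x, x ∈ s ↔ (x ∈ L ∧ p x = true)) :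
    PySem.List.sorted s (fun x => x) false = L.filter p := by
  apply PySem.List.sorted_eq_of_perm_of_pairwise_lt
  · apply (List.perm_ext_iff_of_nodup (hLnd.filter p) hnd).mpr
    intro x
    rw [List.mem_filter, hmem]
  · exact hLpw.filter p

lemma pv_missing_eq (base cur : List (String × List (String × String))) :
    PySem.List.sorted (PySem.Set.diff (PySem.Set.ofList ((PySem.Dict.mk base).keys)) (PySem.Set.ofList ((PySem.Dict.mk cur).keys))) (fun x => x) false
      = (pvK base).filter (fun k => !decide (k ∈ pvK cur)) := by
  apply pv_sorted_eq_filter _ _ _ (PySem.Set.nodup_diff _ _ (PySem.Set.nodup_ofList _))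
    (pvK_nodup base) (pvK_pairwise base)
  intro x
  rw [PySem.Set.mem_diff, PySem.Set.mem_ofList, PySem.Set.mem_ofList, ← pvK_mem, ← pvK_mem]
  simp

lemma pv_extra_eq (base cur : List (String × List (String × String))) :
    PySem.List.sorted (PySem.Set.diff (PySem.Set.ofList ((PySem.Dict.mk cur).keys)) (PySem.Set.ofList ((PySem.Dict.mk base).keys))) (fun x => x) false
      = (pvK cur).filter (fun k => !decide (k ∈ pvK base)) := by
  apply pv_sorted_eq_filter _ _ _ (PySem.Set.nodup_diff _ _ (PySem.Set.nodup_ofList _))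
    (pvK_nodup cur) (pvK_pairwise cur)
  intro x
  rw [PySem.Set.mem_diff, PySem.Set.mem_ofList, PySem.Set.mem_ofList, ← pvK_mem, ← pvK_mem]
  simp

lemma pv_inter_eq (base cur : List (String × List (String × String))) :
    PySem.List.sorted (PySem.Set.inter (PySem.Set.ofList ((PySem.Dict.mk base).keys)) (PySem.Set.ofList ((PySem.Dict.mk cur).keys))) (fun x => x) false
      = (pvK base).filter (fun k => decide (k ∈ pvK cur)) := by
  apply pv_sorted_eq_filter _ _ _ (PySem.Set.nodup_inter _ _ (PySem.Set.nodup_ofList _))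
    (pvK_nodup base) (pvK_pairwise base)
  intro x
  rw [PySem.Set.mem_inter, PySem.Set.mem_ofList, PySem.Set.mem_ofList, ← pvK_mem, ← pvK_mem]
  simp

-- the merge loop over two strictly sorted lists computes the three filters
lemma pvMergeLoop_eq (base cur : List (String × List (String × String))) :
    ∀ (l1 l2 : List String), l1.Pairwise (· < ·) → l2.Pairwise (· < ·) →
    ∀ (m e : List String) (mm : List (String × Int × Int × String × String)),
    pvMergeLoop base cur l1 l2 m e mm
      = (m ++ l1.filter (fun k => !decide (k ∈ l2)),
         e ++ l2.filter (fun k => !decide (k ∈ l1)),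
         mm ++ ((l1.filter (fun k => decide (k ∈ l2))).filter (pvDiffB base cur)).map (pvTup base cur)) := by
  intro l1
  induction l1 with
  | nil =>
    intro l2 _ _ m e mm
    simp [pvMergeLoop]
  | cons b bt ih1 =>
    intro l2
    induction l2 with
    | nil =>
      intro _ _ m e mm
      simp [pvMergeLoop]
    | cons c ct ih2 =>
      intro h1 h2 m e mm
      have hb1 : ∀ x ∈ bt, b < x := fun x hx => (List.pairwise_cons.mp h1).1 x hx
      have hc1 : ∀ x ∈ ct, c < x := fun x hx => (List.pairwise_cons.mp h2).1 x hx
      rw [pvMergeLoop]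
      by_cases hbc : b < c
      · rw [if_pos hbc, ih1 (c :: ct) (List.pairwise_cons.mp h1).2 h2]
        have hbnot : b ∉ c :: ct := by
          intro h
          rcases List.mem_cons.mp h with h | h
          · exact absurd (h ▸ hbc) (lt_irrefl _)
          · exact absurd (hbc.trans (hc1 _ h)) (lt_irrefl _)
        have hne : ∀ x ∈ c :: ct, x ≠ b := by
          intro x hx h
          rcases List.mem_cons.mp hx with hx | hx
          · exact absurd (hx ▸ h ▸ hbc) (lt_irrefl _)
          · exact absurd (h ▸ (hbc.trans (hc1 _ hx))) (lt_irrefl _)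
        have e1 : (c :: ct).filter (fun k => !decide (k ∈ b :: bt))
            = (c :: ct).filter (fun k => !decide (k ∈ bt)) := by
          apply List.filter_congr
          intro x hx
          simp [List.mem_cons, hne x hx]
        have hbne : ¬ b = c := ne_of_lt hbc
        have hbct : b ∉ ct := fun h => absurd (hbc.trans (hc1 _ h)) (lt_irrefl _)
        rw [e1]
        simp [List.filter_cons, hbne, hbct, List.append_assoc]
      · rw [if_neg hbc]
        by_cases hcb : c < b
        · rw [if_pos hcb, ih2 h1 (List.pairwise_cons.mp h2).2]
          have hcnot : c ∉ b :: bt := by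
            intro h
            rcases List.mem_cons.mp h with h | h
            · exact absurd (h ▸ hcb) (lt_irrefl _)
            · exact absurd (hcb.trans (hb1 _ h)) (lt_irrefl _)
          have hne : ∀ x ∈ b :: bt, x ≠ c := by
            intro x hx h
            rcases List.mem_cons.mp hx with hx | hx
            · exact absurd (hx ▸ h ▸ hcb) (lt_irrefl _)
            · exact absurd (h ▸ (hcb.trans (hb1 _ hx))) (lt_irrefl _)
          have e1 : (b :: bt).filter (fun k => !decide (k ∈ c :: ct))
              = (b :: bt).filter (fun k => !decide (k ∈ ct)) := by
            apply List.filter_congr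
            intro x hx
            simp [List.mem_cons, hne x hx]
          have e2 : (b :: bt).filter (fun k => decide (k ∈ c :: ct))
              = (b :: bt).filter (fun k => decide (k ∈ ct)) := by
            apply List.filter_congr
            intro x hx
            simp [List.mem_cons, hne x hx]
          have hcne : ¬ c = b := ne_of_lt hcb
          have hcbt : c ∉ bt := fun h => absurd (hcb.trans (hb1 _ h)) (lt_irrefl _)
          rw [e1, e2]
          simp [List.filter_cons, hcne, hcbt, List.append_assoc]
        · -- b = c
          have hbc' : b = c := le_antisymm (not_lt.mp hcb) (not_lt.mp hbc)
          subst hbc'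
          have hne1 : ∀ x ∈ bt, x ≠ b := fun x hx h => absurd (h ▸ hb1 _ hx) (lt_irrefl _)
          have hne2 : ∀ x ∈ ct, x ≠ b := fun x hx h => absurd (h ▸ hc1 _ hx) (lt_irrefl _)
          have e1 : (b :: bt).filter (fun k => !decide (k ∈ b :: ct))
              = bt.filter (fun k => !decide (k ∈ ct)) := by
            rw [List.filter_cons]
            simp only [List.mem_cons, true_or, decide_true, Bool.not_true]
            apply List.filter_congr
            intro x hx
            simp [hne1 x hx]
          have e2 : (b :: ct).filter (fun k => !decide (k ∈ b :: bt))
              = ct.filter (fun k => !decide (k ∈ bt)) := by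
            rw [List.filter_cons]
            simp only [List.mem_cons, true_or, decide_true, Bool.not_true]
            apply List.filter_congr
            intro x hx
            simp [hne2 x hx]
          have e3 : (b :: bt).filter (fun k => decide (k ∈ b :: ct))
              = b :: bt.filter (fun k => decide (k ∈ ct)) := by
            rw [List.filter_cons]
            simp only [List.mem_cons, true_or, decide_true, if_true]
            congr 1
            apply List.filter_congr
            intro x hx
            simp [hne1 x hx]
          have ihbc := ih1 ct (List.pairwise_cons.mp h1).2 (List.pairwise_cons.mp h2).2
          by_cases hd : pvErrno (((PySem.Dict.mk base).get? b).getD []) = pvErrno (((PySem.Dict.mk cur).get? b).getD [])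
          · rw [if_neg (not_not_intro hd), ihbc, e1, e2, e3, List.filter_cons]
            have : pvDiffB base cur b = false := by simp [pvDiffB, hd]
            simp [this]
          · rw [if_pos hd, ihbc, e1, e2, e3, List.filter_cons]
            have : pvDiffB base cur b = true := by simp [pvDiffB, hd]
            simp [this, pvTup, List.append_assoc]

-- ===== VERDICT (by name: the statement is the Claim_ definition above) =====
theorem diff_cases_spec : Claim_equal_diff_cases := by
  intro base cur _hdom _hpre
  show diff_cases base cur = diff_cases_alt base cur
  have hB : diff_cases_alt base cur = pvMergeLoop base cur (pvK base) (pvK cur) [] [] [] := rfl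
  rw [hB, pvMergeLoop_eq base cur _ _ (pvK_pairwise base) (pvK_pairwise cur)]
  simp only [diff_cases]
  rw [pvAfold, pv_missing_eq, pv_extra_eq, pv_inter_eq]
  simp only [List.nil_append]
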